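-- pv_equiv track=rewrite | github.com/Wvidit/Synnapse | context/contextbench.py | policy_c_compression
-- ===== SOURCE A (Python) =====
-- from typing import List
--
-- def policy_c_compression(
--     new_observation: str,
--     history: List[str],
--     max_tokens: int = 2048,
--     query: str = "",
-- ) -> List[str]:
--     """
--     Pin verified facts. When context exceeds half the budget,
--     compress older entries into a summary while keeping
--     verified facts and the most recent entries intact.
--     """
--     history.append(new_observation)
--     total = _count_tokens(history)
--
--     if total <= max_tokens // 2 or len(history) <= 2:
--         return history
--
--     # Separate verified facts (pinned) from compressible context
--     verified = []
--     compressible = []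
--     recent = history[-2:]  # always keep last 2
--
--     for entry in history[:-2]:
--         if _is_verified_fact(entry):
--             verified.append(entry)
--         else:
--             compressible.append(entry)
--
--     if compressible:
--         summary = _extractive_summary(compressible, max_words=100)
--         history = verified + [f"[CONTEXT SUMMARY]: {summary}"] + recent
--     else:
--         history = verified + recent
--
--     # Final trim if still over budget
--     while _count_tokens(history) > max_tokens and len(history) > 1:
--         history.pop(0)
--
--     return history
--
-- def _count_tokens(entries: List[str]) -> int:
--     """Approximate token count from word count."""
--     return len(" ".join(entries).split())
--
-- def _is_verified_fact(entry: str) -> bool: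
--     """Check if an entry contains a verified/pinned fact."""
--     lower = entry.lower()
--     return any(kw in lower for kw in [
--         "verified", "consistent", "contradiction", "confirmed",
--         "[fact]", "logically valid",
--     ])
--
-- def _extractive_summary(entries: List[str], max_words: int = 100) -> str:
--     """
--     Simple extractive summary: take the first sentence from each
--     entry until we hit the word limit.
--     """
--     sentences = []
--     word_count = 0
--
--     for entry in entries:
--         # Strip the "Action: ...\nObservation: ..." prefix if present
--         text = entry
--         if "Observation:" in text:
--             text = text.split("Observation:", 1)[1].strip()
--
--         # Take first meaningful sentence (skip very short fragments)
--         for sent in text.replace("\n", ". ").split(". "):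
--             sent = sent.strip()
--             if len(sent.split()) < 4:
--                 continue
--             sentences.append(sent)
--             word_count += len(sent.split())
--             if word_count >= max_words:
--                 break
--         if word_count >= max_words:
--             break
--
--     return ". ".join(sentences)[:500]
-- ===== SOURCE B (Python) =====
-- from typing import List
--
-- _PIN_KEYWORDS = ("verified", "consistent", "contradiction", "confirmed", "[fact]", "logically valid")
--
-- def _words(entry: str) -> int:
--     return len(entry.split())
--
-- def _pinned(entry: str) -> bool:
--     low = entry.lower()
--     return any(kw in low for kw in _PIN_KEYWORDS)
--
-- def _candidate_sentences(entries: List[str]) -> List[str]: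
--     cands = []
--     for entry in entries:
--         text = entry
--         if "Observation:" in text:
--             text = text.split("Observation:", 1)[1].strip()
--         cands.extend(s for s in (p.strip() for p in text.replace("\n", ". ").split(". "))
--                      if len(s.split()) >= 4)
--     return cands
--
-- def policy_c_compression(new_observation: str, history: List[str], max_tokens: int = 2048, query: str = "") -> List[str]:
--     history.append(new_observation)
--     total = sum(_words(e) for e in history)
--     if total <= max_tokens // 2 or len(history) <= 2:
--         return history
--     head, recent = history[:-2], history[-2:]
--     verified = [e for e in head if _pinned(e)]
--     compressible = [e for e in head if not _pinned(e)]
--     if compressible: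
--         picked, wc = [], 0
--         for sent in _candidate_sentences(compressible):
--             picked.append(sent)
--             wc += _words(sent)
--             if wc >= 100:
--                 break
--         result = verified + ["[CONTEXT SUMMARY]: " + ". ".join(picked)[:500]] + recent
--     else:
--         result = verified + recent
--     # single-pass trim with precomputed per-entry counts
--     counts = [_words(e) for e in result]
--     remaining = sum(counts)
--     i = 0
--     while i < len(result) - 1 and remaining > max_tokens:
--         remaining -= counts[i]
--         i += 1
--     return result[i:]
-- ===== Notes on version B (the rewrite author's own statement) =====
-- stated objective: alternative
-- what changed: Per-entry word counts are computed once and the final trim drops a prefix with a running suffix sum in a single pass (A re-joins and re-counts the whole remaining list on every pop), and the summary is built by flattening all candidate sentences and taking a word-budget prefix instead of A's nested loops with breaks; trade-off: many small per-entry split() calls cost more in constants than A's single join/split on inputs that return early.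
import Mathlib
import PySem

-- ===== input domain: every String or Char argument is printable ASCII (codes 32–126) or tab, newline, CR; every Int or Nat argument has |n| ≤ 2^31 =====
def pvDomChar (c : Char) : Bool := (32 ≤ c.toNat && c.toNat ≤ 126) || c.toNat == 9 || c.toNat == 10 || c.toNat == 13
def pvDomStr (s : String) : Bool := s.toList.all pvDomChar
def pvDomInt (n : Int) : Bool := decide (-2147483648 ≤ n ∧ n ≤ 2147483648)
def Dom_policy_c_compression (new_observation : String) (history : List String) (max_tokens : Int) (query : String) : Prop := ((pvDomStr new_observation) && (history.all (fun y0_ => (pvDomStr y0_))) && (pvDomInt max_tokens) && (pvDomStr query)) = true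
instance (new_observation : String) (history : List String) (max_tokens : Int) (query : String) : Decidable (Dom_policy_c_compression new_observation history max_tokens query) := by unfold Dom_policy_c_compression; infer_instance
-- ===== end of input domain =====

-- B replaces A's re-count-per-pop trim by a one-pass suffix-sum trim over per-entry word counts
-- and A's nested break loops by flatten-then-take-prefix (objective: alternative). Both Pythons
-- append new_observation to the caller's history list in place (same side effect); the theorems
-- are about the return value.

-- ===== PORT A =====

-- _count_tokens: len(" ".join(entries).split())
def pvA_countTokens (entries : List String) : Nat :=
  (PySem.Str.split₀ (PySem.Str.join " " entries)).length

-- _is_verified_fact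
def pvA_isVerified (entry : String) : Bool :=
  let lower := PySem.Str.lower entry
  (["verified", "consistent", "contradiction", "confirmed", "[fact]", "logically valid"]).any
    (fun kw => PySem.Str.isIn kw lower)

-- inner 'for sent in …' loop of _extractive_summary (state: sentences, word_count; break = return)
def pvA_summaryInner : List String → List String → Nat → List String × Nat
  | [], sents, wc => (sents, wc)
  | p :: rest, sents, wc =>
    let sent := PySem.Str.strip p
    if (PySem.Str.split₀ sent).length < 4 then pvA_summaryInner rest sents wc
    else
      let sents' := sents ++ [sent]
      let wc' := wc + (PySem.Str.split₀ sent).length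
      if 100 ≤ wc' then (sents', wc') else pvA_summaryInner rest sents' wc'

-- per-entry preprocessing of _extractive_summary: the Observation: split and sentence split
def pvA_entryParts (entry : String) : List String :=
  let text := if PySem.Str.isIn "Observation:" entry then
      PySem.Str.strip (PySem.List.pyGetD ((PySem.Str.splitMax? entry "Observation:" 1).getD []) 1 "")
    else entry
  (PySem.Str.split? (PySem.Str.replace text "\n" ". ") ". ").getD []

-- outer 'for entry in entries' loop of _extractive_summary
def pvA_summaryOuter : List String → List String → Nat → List String
  | [], sents, _ => sents
  | e :: rest, sents, wc =>
    let r := pvA_summaryInner (pvA_entryParts e) sents wc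
    if 100 ≤ r.2 then r.1 else pvA_summaryOuter rest r.1 r.2

def pvA_extractiveSummary (entries : List String) : String :=
  PySem.Str.slice (PySem.Str.join ". " (pvA_summaryOuter entries [] 0)) none (some 500)

-- 'while _count_tokens(history) > max_tokens and len(history) > 1: history.pop(0)'
def pvA_trim (mt : Int) : List String → List String
  | [] => []
  | [e] => [e]
  | e :: f :: rest =>
    if mt < (pvA_countTokens (e :: f :: rest) : Int) then pvA_trim mt (f :: rest)
    else e :: f :: rest

def policy_c_compression (new_observation : String) (history : List String) (max_tokens : Int) (query : String) : List String :=
  let history := history ++ [new_observation]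
  if (pvA_countTokens history : Int) ≤ PySem.Int.floordiv max_tokens 2 ∨ history.length ≤ 2 then
    history
  else
    let recent := PySem.List.slice history (some (-2)) none
    let pr := (PySem.List.slice history none (some (-2))).foldl
      (fun (p : List String × List String) e =>
        if pvA_isVerified e then (p.1 ++ [e], p.2) else (p.1, p.2 ++ [e])) ([], [])
    let history2 := if pr.2 ≠ [] then
        pr.1 ++ ["[CONTEXT SUMMARY]: " ++ pvA_extractiveSummary pr.2] ++ recent
      else pr.1 ++ recent
    pvA_trim max_tokens history2

-- ===== PORT B =====

-- _words
def pvB_words (e : String) : Nat := (PySem.Str.split₀ e).length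

-- _pinned
def pvB_pinned (e : String) : Bool :=
  let low := PySem.Str.lower e
  (["verified", "consistent", "contradiction", "confirmed", "[fact]", "logically valid"]).any
    (fun kw => PySem.Str.isIn kw low)

-- body of _candidate_sentences for one entry: stripped sentences with ≥ 4 words
def pvB_entryCands (entry : String) : List String :=
  let text := if PySem.Str.isIn "Observation:" entry then
      PySem.Str.strip (PySem.List.pyGetD ((PySem.Str.splitMax? entry "Observation:" 1).getD []) 1 "")
    else entry
  (((PySem.Str.split? (PySem.Str.replace text "\n" ". ") ". ").getD []).map PySem.Str.strip).filter
    (fun s => 4 ≤ (PySem.Str.split₀ s).length)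

-- the 'for sent in _candidate_sentences(…)' prefix-taking loop
def pvB_pick : List String → Nat → List String
  | [], _ => []
  | s :: rest, wc =>
    let wc' := wc + pvB_words s
    if 100 ≤ wc' then [s] else s :: pvB_pick rest wc'

-- the suffix-sum trim: 'while i < len-1 and remaining > max_tokens: remaining -= counts[i]; i += 1'
def pvB_trim (mt : Int) : List String → Int → List String
  | [], _ => []
  | e :: rest, remaining =>
    if rest ≠ [] ∧ mt < remaining then pvB_trim mt rest (remaining - (pvB_words e : Int))
    else e :: rest

def policy_c_compression_alt (new_observation : String) (history : List String) (max_tokens : Int) (query : String) : List String :=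
  let history := history ++ [new_observation]
  let total := (history.map pvB_words).sum
  if (total : Int) ≤ PySem.Int.floordiv max_tokens 2 ∨ history.length ≤ 2 then
    history
  else
    let head := PySem.List.slice history none (some (-2))
    let recent := PySem.List.slice history (some (-2)) none
    let verified := head.filter (fun e => pvB_pinned e)
    let compressible := head.filter (fun e => !pvB_pinned e)
    let result := if compressible ≠ [] then
        verified ++ ["[CONTEXT SUMMARY]: " ++
          PySem.Str.slice (PySem.Str.join ". " (pvB_pick (compressible.flatMap pvB_entryCands) 0))
            none (some 500)] ++ recent
      else verified ++ recent
    pvB_trim max_tokens result ((result.map pvB_words).sum : Int)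

-- ===== PRECONDITION & SPEC =====
def Spec_policy_c_compression (new_observation : String) (history : List String) (max_tokens : Int) (query : String) (out : List String) : Prop := out = policy_c_compression_alt new_observation history max_tokens query
instance (new_observation : String) (history : List String) (max_tokens : Int) (query : String) (out : List String) : Decidable (Spec_policy_c_compression new_observation history max_tokens query out) := by unfold Spec_policy_c_compression; infer_instance

-- ===== CLAIM (what is proved, stated in full; the proofs are below) =====
def Claim_equal_policy_c_compression : Prop := ∀ (new_observation : String) (history : List String) (max_tokens : Int) (query : String), Dom_policy_c_compression new_observation history max_tokens query → Spec_policy_c_compression new_observation history max_tokens query (policy_c_compression new_observation history max_tokens query)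

-- ===== LEMMAS AND PROOFS =====

-- (1) word-count additivity: split₀ of a " "-join has as many words as the entries together

theorem pv_go_nil (cur : List Char) (acc : List (List Char)) :
    PySem.Chars.split₀.go [] cur acc =
      if cur.isEmpty then acc.reverse else (cur.reverse :: acc).reverse := rfl

theorem pv_go_cons (c : Char) (rest cur : List Char) (acc : List (List Char)) :
    PySem.Chars.split₀.go (c :: rest) cur acc =
      if PySem.Chars.isspace c then
        (if cur.isEmpty then PySem.Chars.split₀.go rest [] acc
         else PySem.Chars.split₀.go rest [] (cur.reverse :: acc))
      else PySem.Chars.split₀.go rest (c :: cur) acc := rfl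

theorem pv_go_acc (s : List Char) : ∀ (cur : List Char) (acc : List (List Char)),
    PySem.Chars.split₀.go s cur acc = acc.reverse ++ PySem.Chars.split₀.go s cur [] := by
  induction s with
  | nil =>
    intro cur acc
    rw [pv_go_nil, pv_go_nil]
    by_cases h : cur.isEmpty <;> simp [h]
  | cons c rest ih =>
    intro cur acc
    rw [pv_go_cons, pv_go_cons]
    by_cases hsp : PySem.Chars.isspace c
    · by_cases hcur : cur.isEmpty
      · simp only [hsp, hcur, if_true]
        exact ih [] acc
      · simp only [hsp, hcur, if_true, if_false, Bool.false_eq_true]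
        rw [ih [] (cur.reverse :: acc), ih [] [cur.reverse]]
        simp
    · simp only [hsp, Bool.false_eq_true, if_false]
      exact ih (c :: cur) acc

theorem pv_go_space (a : List Char) : ∀ (b cur : List Char),
    PySem.Chars.split₀.go (a ++ ' ' :: b) cur [] =
      PySem.Chars.split₀.go a cur [] ++ PySem.Chars.split₀.go b [] [] := by
  induction a with
  | nil =>
    intro b cur
    rw [List.nil_append, pv_go_cons, pv_go_nil]
    by_cases hcur : cur.isEmpty
    · simp [hcur, show PySem.Chars.isspace ' ' = true from by decide]
    · simp only [hcur, show PySem.Chars.isspace ' ' = true from by decide, if_true, if_false,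
        Bool.false_eq_true]
      rw [pv_go_acc b [] [cur.reverse]]
  | cons c rest ih =>
    intro b cur
    rw [List.cons_append, pv_go_cons, pv_go_cons]
    by_cases hsp : PySem.Chars.isspace c
    · by_cases hcur : cur.isEmpty
      · simp only [hsp, hcur, if_true]
        exact ih b []
      · simp only [hsp, hcur, if_true, if_false, Bool.false_eq_true]
        rw [pv_go_acc (rest ++ ' ' :: b) [] [cur.reverse], pv_go_acc rest [] [cur.reverse], ih]
        simp
    · simp only [hsp, Bool.false_eq_true, if_false]
      exact ih b (c :: cur)

theorem pv_split0_append_space (a b : List Char) :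
    PySem.Chars.split₀ (a ++ ' ' :: b) = PySem.Chars.split₀ a ++ PySem.Chars.split₀ b := by
  simp only [PySem.Chars.split₀]
  exact pv_go_space a b []

theorem pv_len_split0 (s : String) :
    (PySem.Str.split₀ s).length = (PySem.Chars.split₀ s.toList).length := by
  rw [← PySem.Str.split₀_map_toList, List.length_map]

theorem pv_count_join_chars : ∀ (l : List String),
    (PySem.Chars.split₀ (PySem.Chars.join [' '] (l.map String.toList))).length
      = (l.map pvB_words).sum := by
  intro l
  induction l with
  | nil => simp [PySem.Chars.join, List.intercalate, PySem.Chars.split₀, pv_go_nil]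
  | cons x xs ih =>
    cases xs with
    | nil =>
      simp [PySem.Chars.join, List.intercalate, pvB_words, pv_len_split0]
    | cons y ys =>
      simp only [List.map_cons] at ih ⊢
      rw [PySem.Chars.join_cons_cons,
          show x.toList ++ [' '] ++ PySem.Chars.join [' '] (y.toList :: ys.map String.toList)
            = x.toList ++ ' ' :: PySem.Chars.join [' '] (y.toList :: ys.map String.toList) from by
              simp,
          pv_split0_append_space, List.length_append, ih]
      simp [pvB_words, pv_len_split0]

theorem pv_count_join (l : List String) : pvA_countTokens l = (l.map pvB_words).sum := by
  rw [pvA_countTokens, pv_len_split0,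
      show (PySem.Str.join " " l).toList = PySem.Chars.join [' '] (l.map String.toList) from by
        rw [PySem.Str.toList_join]; rfl,
      pv_count_join_chars]

-- (2) the partition fold equals two filters

theorem pv_partition (l : List String) : ∀ (a b : List String),
    l.foldl (fun (p : List String × List String) e =>
        if pvA_isVerified e then (p.1 ++ [e], p.2) else (p.1, p.2 ++ [e])) (a, b)
      = (a ++ l.filter (fun e => pvB_pinned e), b ++ l.filter (fun e => !pvB_pinned e)) := by
  have hv : pvA_isVerified = pvB_pinned := rfl
  induction l with
  | nil => simp
  | cons x xs ih =>
    intro a b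
    by_cases h : pvA_isVerified x
    · simp [List.foldl_cons, h, ih, hv ▸ h]
    · simp only [List.foldl_cons, if_neg h, ih]
      simp [hv ▸ h]

-- (3) the summary loops: A's nested breaks = B's flatten-then-prefix

-- proof helper: A's inner loop restricted to the already stripped-and-filtered candidates
def pvC_inner : List String → List String → Nat → List String × Nat
  | [], sents, wc => (sents, wc)
  | s :: rest, sents, wc =>
    let wc' := wc + (PySem.Str.split₀ s).length
    if 100 ≤ wc' then (sents ++ [s], wc') else pvC_inner rest (sents ++ [s]) wc'

theorem pv_inner_to_C (parts : List String) : ∀ sents wc,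
    pvA_summaryInner parts sents wc
      = pvC_inner ((parts.map PySem.Str.strip).filter
          (fun s => 4 ≤ (PySem.Str.split₀ s).length)) sents wc := by
  induction parts with
  | nil => intro sents wc; rfl
  | cons p rest ih =>
    intro sents wc
    by_cases h : (PySem.Str.split₀ (PySem.Str.strip p)).length < 4
    · have h' : ¬ 4 ≤ (PySem.Str.split₀ (PySem.Str.strip p)).length := by omega
      simp [pvA_summaryInner, h, h', ih]
    · have h' : 4 ≤ (PySem.Str.split₀ (PySem.Str.strip p)).length := by omega
      simp only [pvA_summaryInner, if_neg h, List.map_cons, List.filter_cons, h', decide_true,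
        if_true, pvC_inner, ih]

theorem pv_entryCands_eq (e : String) :
    pvB_entryCands e
      = ((pvA_entryParts e).map PySem.Str.strip).filter
          (fun s => 4 ≤ (PySem.Str.split₀ s).length) := rfl

theorem pv_C_acc (cs : List String) : ∀ sents wc,
    pvC_inner cs sents wc = (sents ++ (pvC_inner cs [] wc).1, (pvC_inner cs [] wc).2) := by
  induction cs with
  | nil => intro sents wc; simp [pvC_inner]
  | cons c rest ih =>
    intro sents wc
    by_cases h : 100 ≤ wc + (PySem.Str.split₀ c).length
    · simp [pvC_inner, h]
    · simp only [pvC_inner, if_neg h, List.nil_append]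
      rw [ih (sents ++ [c]), ih [c]]
      simp

theorem pv_pick_split (cs : List String) : ∀ (zs : List String) (wc : Nat), wc < 100 →
    pvB_pick (cs ++ zs) wc
      = (pvC_inner cs [] wc).1 ++
        (if 100 ≤ (pvC_inner cs [] wc).2 then [] else pvB_pick zs (pvC_inner cs [] wc).2) := by
  induction cs with
  | nil =>
    intro zs wc hwc
    have : ¬ 100 ≤ wc := by omega
    simp [pvC_inner, this]
  | cons c rest ih =>
    intro zs wc hwc
    by_cases h : 100 ≤ wc + (PySem.Str.split₀ c).length
    · simp [pvB_pick, pvB_words, pvC_inner, h]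
    · have hlt : wc + (PySem.Str.split₀ c).length < 100 := by omega
      simp only [List.cons_append, pvB_pick, pvB_words, pvC_inner, if_neg h, List.nil_append]
      rw [ih zs _ hlt, pv_C_acc rest [c]]
      simp

theorem pv_outer_eq (entries : List String) : ∀ sents wc, wc < 100 →
    pvA_summaryOuter entries sents wc
      = sents ++ pvB_pick (entries.flatMap pvB_entryCands) wc := by
  induction entries with
  | nil => intro sents wc hwc; simp [pvA_summaryOuter, pvB_pick]
  | cons e rest ih =>
    intro sents wc hwc
    rw [List.flatMap_cons, pv_pick_split _ _ _ hwc]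
    have hstep : pvA_summaryOuter (e :: rest) sents wc
        = if 100 ≤ (pvA_summaryInner (pvA_entryParts e) sents wc).2 then
            (pvA_summaryInner (pvA_entryParts e) sents wc).1
          else pvA_summaryOuter rest (pvA_summaryInner (pvA_entryParts e) sents wc).1
            (pvA_summaryInner (pvA_entryParts e) sents wc).2 := rfl
    rw [hstep, pv_inner_to_C, ← pv_entryCands_eq, pv_C_acc (pvB_entryCands e) sents wc]
    generalize pvC_inner (pvB_entryCands e) [] wc = q
    by_cases h : 100 ≤ q.2
    · rw [if_pos h, if_pos h, List.append_nil]
    · have hlt : q.2 < 100 := by omega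
      rw [if_neg h, if_neg h, ih _ _ hlt, List.append_assoc]

-- (4) the trims agree once the running total is the word count of the list

theorem pv_trim_eq (mt : Int) : ∀ (l : List String),
    pvA_trim mt l = pvB_trim mt l (((l.map pvB_words).sum : Nat) : Int) := by
  intro l
  induction l with
  | nil => rfl
  | cons e rest ih =>
    cases rest with
    | nil => simp [pvA_trim, pvB_trim]
    | cons f rs =>
      rw [pvA_trim, pvB_trim]
      have hcnt : (pvA_countTokens (e :: f :: rs) : Int)
          = ((((e :: f :: rs).map pvB_words).sum : Nat) : Int) := by
        rw [pv_count_join]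
      by_cases h : mt < (pvA_countTokens (e :: f :: rs) : Int)
      · have h' : (f :: rs ≠ []) ∧ mt < ((((e :: f :: rs).map pvB_words).sum : Nat) : Int) :=
          ⟨by simp, by rw [← hcnt]; exact h⟩
        rw [if_pos h, if_pos h', ih]
        congr 1
        simp only [List.map_cons, List.sum_cons]
        push_cast
        ring
      · have h' : ¬ ((f :: rs ≠ []) ∧ mt < ((((e :: f :: rs).map pvB_words).sum : Nat) : Int)) := by
          rw [← hcnt]; intro hc; exact h hc.2
        rw [if_neg h, if_neg h']

-- ===== VERDICT (by name: the statement is the Claim_ definition above) =====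
theorem policy_c_compression_spec : Claim_equal_policy_c_compression := by
  intro new_observation history max_tokens query _
  unfold Spec_policy_c_compression
  simp only [policy_c_compression, policy_c_compression_alt]
  rw [pv_count_join]
  by_cases hret : ((((history ++ [new_observation]).map pvB_words).sum : Int)
      ≤ PySem.Int.floordiv max_tokens 2 ∨ (history ++ [new_observation]).length ≤ 2)
  · rw [if_pos hret, if_pos hret]
  · rw [if_neg hret, if_neg hret]
    rw [pv_partition _ [] []]
    simp only [List.nil_append]
    rw [pvA_extractiveSummary, pv_outer_eq _ _ _ (by omega), List.nil_append, pv_trim_eq]
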